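-- pv_equiv track=rewrite | github.com/srivatsaSundar/Upbeat | core/genai/routes.py | custom_encode
-- ===== SOURCE A (Python) =====
-- def custom_encode(value):
--   label_mappings = {
--         'mood_swing': {'NO': 0, 'YES': 1},
--         'optimisim': {'1 From 10': 0, '2 From 10': 1, '3 From 10': 2, '4 From 10': 3, '5 From 10': 4, '6 From 10': 5, '7 From 10': 6, '8 From 10': 7, '9 From 10': 8},
--         'euphoric': {'Seldom': 0, 'Most-Often': 1, 'Usually': 2, 'Sometimes': 3},
--         'exhausted': {'Sometimes': 0, 'Usually': 1, 'Seldom': 2, 'Most-Often': 3},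
--         'concentration': {'1 From 10': 0, '2 From 10': 1, '3 From 10': 2, '4 From 10': 3, '5 From 10': 4, '6 From 10': 5, '7 From 10': 6, '8 From 10': 7, '9 From 10': 8},
--         'sexual_activity': {'1 From 10': 0, '2 From 10': 1, '3 From 10': 2, '4 From 10': 3, '5 From 10': 4, '6 From 10': 5, '7 From 10': 6, '8 From 10': 7, '9 From 10': 8},
--         'aggressive_response': {'NO': 0, 'YES': 1},
--         'suicidal_thoughts': {'NO': 0, 'YES': 1},
--         'authority_respect': {'NO': 0, 'YES': 1},
--         'sadness': {'Usually': 0, 'Sometimes': 1, 'Seldom': 2, 'Most-Often': 3}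
--     }
--   for col, mapping in label_mappings.items():
--     if value in mapping:
--       return mapping[value]
--   return None
-- ===== SOURCE B (Python) =====
-- # B: one flat dict merging all sub-mappings (first-occurrence wins), so lookup is a single get.
-- _FLAT = {
--     'NO': 0, 'YES': 1,
--     '1 From 10': 0, '2 From 10': 1, '3 From 10': 2, '4 From 10': 3,
--     '5 From 10': 4, '6 From 10': 5, '7 From 10': 6, '8 From 10': 7, '9 From 10': 8,
--     'Seldom': 0, 'Most-Often': 1, 'Usually': 2, 'Sometimes': 3,
-- }
--
-- def custom_encode(value):
--     return _FLAT.get(value)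
-- ===== Notes on version B (the rewrite author's own statement) =====
-- stated objective: simpler
-- what changed: Replaced the scan over ten nested sub-dicts with a single precomputed flat dict (first-occurrence value kept for duplicated keys) so the body is one .get lookup.
import Mathlib
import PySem

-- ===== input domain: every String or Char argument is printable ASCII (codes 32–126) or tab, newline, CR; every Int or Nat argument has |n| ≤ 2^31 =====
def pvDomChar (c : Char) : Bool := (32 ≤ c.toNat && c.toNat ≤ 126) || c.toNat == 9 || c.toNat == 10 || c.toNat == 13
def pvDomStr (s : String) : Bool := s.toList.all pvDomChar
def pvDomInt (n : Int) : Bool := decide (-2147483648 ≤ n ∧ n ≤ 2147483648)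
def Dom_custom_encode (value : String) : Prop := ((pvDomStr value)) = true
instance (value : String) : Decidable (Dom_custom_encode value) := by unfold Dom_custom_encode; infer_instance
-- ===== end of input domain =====

-- B replaces A's scan over ten nested sub-dicts with one precomputed flat first-occurrence-wins dict and a single lookup (simpler; return value only).

-- ===== PORT A =====
-- a sub-dict: association list; 'value in mapping' / 'mapping[value]' = first-match lookup
def pvAGet (m : List (String × Int)) (v : String) : Option Int :=
  match m with
  | [] => none
  | (k, x) :: r => if v = k then some x else pvAGet r v

-- the for-loop over label_mappings.items(): return on the first mapping containing value
def pvALoop (ms : List (String × List (String × Int))) (v : String) : Option Int :=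
  match ms with
  | [] => none
  | (_, m) :: rest => if (pvAGet m v).isSome then pvAGet m v else pvALoop rest v

def custom_encode (value : String) : Option Int :=
  pvALoop
    [ ("mood_swing", [("NO", 0), ("YES", 1)]),
      ("optimisim", [("1 From 10", 0), ("2 From 10", 1), ("3 From 10", 2), ("4 From 10", 3), ("5 From 10", 4), ("6 From 10", 5), ("7 From 10", 6), ("8 From 10", 7), ("9 From 10", 8)]),
      ("euphoric", [("Seldom", 0), ("Most-Often", 1), ("Usually", 2), ("Sometimes", 3)]),
      ("exhausted", [("Sometimes", 0), ("Usually", 1), ("Seldom", 2), ("Most-Often", 3)]),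
      ("concentration", [("1 From 10", 0), ("2 From 10", 1), ("3 From 10", 2), ("4 From 10", 3), ("5 From 10", 4), ("6 From 10", 5), ("7 From 10", 6), ("8 From 10", 7), ("9 From 10", 8)]),
      ("sexual_activity", [("1 From 10", 0), ("2 From 10", 1), ("3 From 10", 2), ("4 From 10", 3), ("5 From 10", 4), ("6 From 10", 5), ("7 From 10", 6), ("8 From 10", 7), ("9 From 10", 8)]),
      ("aggressive_response", [("NO", 0), ("YES", 1)]),
      ("suicidal_thoughts", [("NO", 0), ("YES", 1)]),
      ("authority_respect", [("NO", 0), ("YES", 1)]),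
      ("sadness", [("Usually", 0), ("Sometimes", 1), ("Seldom", 2), ("Most-Often", 3)]) ]
    value

-- ===== PORT B =====
-- the flat merged dict from Source B (distinct keys), dict.get = lookup
def pvFlat : List (String × Int) :=
  [ ("NO", 0), ("YES", 1),
    ("1 From 10", 0), ("2 From 10", 1), ("3 From 10", 2), ("4 From 10", 3),
    ("5 From 10", 4), ("6 From 10", 5), ("7 From 10", 6), ("8 From 10", 7), ("9 From 10", 8),
    ("Seldom", 0), ("Most-Often", 1), ("Usually", 2), ("Sometimes", 3) ]

def custom_encode_alt (value : String) : Option Int :=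
  pvFlat.lookup value

-- ===== PRECONDITION & SPEC =====
def Spec_custom_encode (value : String) (out : Option Int) : Prop := out = custom_encode_alt value
instance (value : String) (out : Option Int) : Decidable (Spec_custom_encode value out) := by unfold Spec_custom_encode; infer_instance

-- ===== CLAIM (what is proved, stated in full; the proofs are below) =====
def Claim_equal_custom_encode : Prop := ∀ (value : String), Dom_custom_encode value → Spec_custom_encode value (custom_encode value)

-- ===== LEMMAS AND PROOFS =====

-- ===== VERDICT (by name: the statement is the Claim_ definition above) =====
theorem custom_encode_spec : Claim_equal_custom_encode := by
  intro value _
  unfold Spec_custom_encode custom_encode custom_encode_alt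
  by_cases h1 : value = "NO"
  · subst h1; rfl
  by_cases h2 : value = "YES"
  · subst h2; rfl
  by_cases h3 : value = "1 From 10"
  · subst h3; rfl
  by_cases h4 : value = "2 From 10"
  · subst h4; rfl
  by_cases h5 : value = "3 From 10"
  · subst h5; rfl
  by_cases h6 : value = "4 From 10"
  · subst h6; rfl
  by_cases h7 : value = "5 From 10"
  · subst h7; rfl
  by_cases h8 : value = "6 From 10"
  · subst h8; rfl
  by_cases h9 : value = "7 From 10"
  · subst h9; rfl
  by_cases h10 : value = "8 From 10"
  · subst h10; rfl
  by_cases h11 : value = "9 From 10"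
  · subst h11; rfl
  by_cases h12 : value = "Seldom"
  · subst h12; rfl
  by_cases h13 : value = "Most-Often"
  · subst h13; rfl
  by_cases h14 : value = "Usually"
  · subst h14; rfl
  by_cases h15 : value = "Sometimes"
  · subst h15; rfl
  have b1 : (value == "NO") = false := beq_eq_false_iff_ne.mpr h1
  have b2 : (value == "YES") = false := beq_eq_false_iff_ne.mpr h2
  have b3 : (value == "1 From 10") = false := beq_eq_false_iff_ne.mpr h3
  have b4 : (value == "2 From 10") = false := beq_eq_false_iff_ne.mpr h4
  have b5 : (value == "3 From 10") = false := beq_eq_false_iff_ne.mpr h5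
  have b6 : (value == "4 From 10") = false := beq_eq_false_iff_ne.mpr h6
  have b7 : (value == "5 From 10") = false := beq_eq_false_iff_ne.mpr h7
  have b8 : (value == "6 From 10") = false := beq_eq_false_iff_ne.mpr h8
  have b9 : (value == "7 From 10") = false := beq_eq_false_iff_ne.mpr h9
  have b10 : (value == "8 From 10") = false := beq_eq_false_iff_ne.mpr h10
  have b11 : (value == "9 From 10") = false := beq_eq_false_iff_ne.mpr h11
  have b12 : (value == "Seldom") = false := beq_eq_false_iff_ne.mpr h12
  have b13 : (value == "Most-Often") = false := beq_eq_false_iff_ne.mpr h13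
  have b14 : (value == "Usually") = false := beq_eq_false_iff_ne.mpr h14
  have b15 : (value == "Sometimes") = false := beq_eq_false_iff_ne.mpr h15
  simp [pvALoop, pvAGet, pvFlat, List.lookup, h1, b1, h2, b2, h3, b3, h4, b4, h5, b5, h6, b6, h7, b7, h8, b8, h9, b9, h10, b10, h11, b11, h12, b12, h13, b13, h14, b14, h15, b15]
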